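-- pv_equiv track=rewrite | github.com/hafhaff/eng-intern-challenge | python/translator.py | english_to_braille
-- ===== SOURCE A (Python) =====
-- braille_alphabet = {
--     'a' : 'O.....', 'b' : 'O.O...', 'c' : 'OO....', 'd' : 'OO.O..', 'e' : 'O..O..',
--     'f' : 'OOO...', 'g' : 'OOOO..', 'h' : 'O.OO..', 'i' : '.O.O..', 'j' : '.OOO..',
--     'k' : 'O...O.', 'l' : 'O.O.O.', 'm' : 'OO..O.', 'n' : 'OO.OO.', 'o' : 'O..OO.',
--     'p' : 'OOO.O.', 'q' : 'OOOOO.', 'r' : 'O.OOO.', 's' : '.OO.O.', 't' : '.OOOO.',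
--     'u' : 'O...OO', 'v' : 'O.O.OO', 'w' : '.OOO.O', 'x' : 'OO..OO', 'y' : 'OO.OOO',
--     'z' : 'O..OOO', ' ' : '......',
-- }
--
-- braille_numbers = {
--     '1' : 'O.....', '2' : 'O.O...', '3' : 'OO....', '4' : 'OO.O..', '5' : 'O..O..',
--     '6' : 'OOO...', '7' : 'OOOO..', '8' : 'O.OO..', '9' : '.OO...', '0' : '.OOO..',
-- }
--
-- capital_follows = '.....O'
--
-- number_follows = '.O.OOO'
--
-- def english_to_braille(input_str):
--     result = []
--     is_number = False  # flag to check if a number is following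
--
--     for char in input_str:
--         if char.isupper():  # check if the character is a capital letter
--             result.append(capital_follows)
--             result.append(braille_alphabet[char.lower()])
--             is_number = False
--         elif char.isdigit():  # check if the character is a number
--             if not is_number:
--                 result.append(number_follows)
--                 is_number = True
--             result.append(braille_numbers[char])
--         else:  # check if the character is a letter
--             result.append(braille_alphabet[char])
--             is_number = False
--
--     return ''.join(result)
-- ===== SOURCE B (Python) =====
-- # B: encodes braille cells from 6-bit masks (bit k set -> dot k is 'O') instead of
-- # literal cell-string tables, and processes the input run-by-run (maximal digit /
-- # non-digit runs) instead of a per-character loop with an is_number flag.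
--
-- _LETTER_MASKS = (1, 5, 3, 11, 9, 7, 15, 13, 10, 14, 17, 21, 19, 27, 25, 23,
--                  31, 29, 22, 30, 49, 53, 46, 51, 59, 57)   # 'a'..'z'
-- _DIGIT_MASKS = (14, 1, 5, 3, 11, 9, 7, 15, 13, 6)          # '0'..'9'
-- _CAPITAL_MASK = 32
-- _NUMBER_MASK = 58
--
--
-- def _cell(mask):
--     return ''.join('O' if (mask >> k) & 1 else '.' for k in range(6))
--
--
-- def _runs(s):
--     """Split s into maximal runs of digits / non-digits: list of (is_digit, run)."""
--     runs = []
--     i = 0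
--     n = len(s)
--     while i < n:
--         d = s[i].isdigit()
--         j = i + 1
--         while j < n and s[j].isdigit() == d:
--             j += 1
--         runs.append((d, s[i:j]))
--         i = j
--     return runs
--
--
-- def english_to_braille(input_str):
--     parts = []
--     for is_digit, run in _runs(input_str):
--         if is_digit:
--             parts.append(_cell(_NUMBER_MASK))
--             parts.extend(_cell(_DIGIT_MASKS[ord(d) - 48]) for d in run)
--         else:
--             for c in run:
--                 if c == ' ':
--                     parts.append(_cell(0))
--                 elif c.isupper():
--                     parts.append(_cell(_CAPITAL_MASK) + _cell(_LETTER_MASKS[ord(c) - 65]))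
--                 else:
--                     parts.append(_cell(_LETTER_MASKS[ord(c) - 97]))
--     return ''.join(parts)
-- ===== Notes on version B (the rewrite author's own statement) =====
-- stated objective: alternative
-- what changed: B replaces the literal cell-string dictionaries by 6-bit dot masks rendered by a _cell function, and encodes the input run-by-run (maximal digit/non-digit runs split first, one number_follows per digit run) instead of A's per-character loop threading an is_number flag.
import Mathlib
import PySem

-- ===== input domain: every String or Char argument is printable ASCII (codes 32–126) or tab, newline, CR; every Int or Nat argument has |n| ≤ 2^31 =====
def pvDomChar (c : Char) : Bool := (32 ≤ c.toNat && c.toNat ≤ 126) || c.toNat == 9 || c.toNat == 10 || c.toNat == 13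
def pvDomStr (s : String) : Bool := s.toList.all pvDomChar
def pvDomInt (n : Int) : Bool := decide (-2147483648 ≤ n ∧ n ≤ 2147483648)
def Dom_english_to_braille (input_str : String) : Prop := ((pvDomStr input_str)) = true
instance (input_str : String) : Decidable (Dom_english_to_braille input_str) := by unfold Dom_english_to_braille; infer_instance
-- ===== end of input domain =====

-- B renders each braille cell from a 6-bit dot mask instead of literal cell-string
-- tables, and encodes run-by-run (maximal digit/non-digit runs) instead of A's
-- per-character loop with an is_number flag; same cost, different representation.

-- ===== PORT A =====
-- shared constants/tables of the module
def capital_follows : String := ".....O"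
def number_follows : String := ".O.OOO"

-- braille_alphabet[c]; A raises KeyError outside these keys (excluded by Pre_),
-- "" is never produced inside Pre_.
def brailleAlphabet (c : Char) : String :=
  match c with
  | 'a' => "O....." | 'b' => "O.O..." | 'c' => "OO...." | 'd' => "OO.O.." | 'e' => "O..O.."
  | 'f' => "OOO..." | 'g' => "OOOO.." | 'h' => "O.OO.." | 'i' => ".O.O.." | 'j' => ".OOO.."
  | 'k' => "O...O." | 'l' => "O.O.O." | 'm' => "OO..O." | 'n' => "OO.OO." | 'o' => "O..OO."
  | 'p' => "OOO.O." | 'q' => "OOOOO." | 'r' => "O.OOO." | 's' => ".OO.O." | 't' => ".OOOO."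
  | 'u' => "O...OO" | 'v' => "O.O.OO" | 'w' => ".OOO.O" | 'x' => "OO..OO" | 'y' => "OO.OOO"
  | 'z' => "O..OOO" | ' ' => "......"
  | _ => ""

-- braille_numbers[c]
def brailleNumbers (c : Char) : String :=
  match c with
  | '1' => "O....." | '2' => "O.O..." | '3' => "OO...." | '4' => "OO.O.." | '5' => "O..O.."
  | '6' => "OOO..." | '7' => "OOOO.." | '8' => "O.OO.." | '9' => ".OO..." | '0' => ".OOO.."
  | _ => ""

-- char.isupper() / char.isdigit() on the ASCII domain
def pyIsUpper (c : Char) : Bool := 'A' ≤ c && c ≤ 'Z'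
def pyIsDigit (c : Char) : Bool := '0' ≤ c && c ≤ '9'

-- one step of A's loop on the state (result, is_number)
def aStep (st : List String × Bool) (c : Char) : List String × Bool :=
  if pyIsUpper c then (st.1 ++ [capital_follows, brailleAlphabet c.toLower], false)
  else if pyIsDigit c then
    (if st.2 then st.1 ++ [brailleNumbers c] else st.1 ++ [number_follows, brailleNumbers c], true)
  else (st.1 ++ [brailleAlphabet c], false)

def english_to_braille (input_str : String) : String :=
  String.join (input_str.toList.foldl aStep ([], false)).1

-- ===== PORT B =====
-- 6-bit dot masks for 'a'..'z' and '0'..'9' (bit k -> 'O' at position k)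
def bLetterMasks : List Nat :=
  [1, 5, 3, 11, 9, 7, 15, 13, 10, 14, 17, 21, 19, 27, 25, 23,
   31, 29, 22, 30, 49, 53, 46, 51, 59, 57]
def bDigitMasks : List Nat := [14, 1, 5, 3, 11, 9, 7, 15, 13, 6]

-- _cell(mask): render a 6-char cell from the mask's bits
def bCell (m : Nat) : String :=
  String.join ((List.range 6).map (fun k => if (m >>> k) &&& 1 == 1 then "O" else "."))

def bIsDigit (c : Char) : Bool := 48 ≤ c.toNat && c.toNat ≤ 57
def bIsUpper (c : Char) : Bool := 65 ≤ c.toNat && c.toNat ≤ 90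

-- _runs: split into maximal runs of digits / non-digits (Source B's index scan, structurally)
def bRuns : List Char → List (Bool × List Char)
  | [] => []
  | c :: rest =>
    let d := bIsDigit c
    (d, c :: rest.takeWhile (fun x => bIsDigit x == d)) ::
      bRuns (rest.dropWhile (fun x => bIsDigit x == d))
termination_by l => l.length
decreasing_by
  simp only [List.length_cons]
  exact Nat.lt_succ_of_le (List.length_dropWhile_le _ _)

-- one digit of a digit run (Python _DIGIT_MASKS[ord(d)-48]; pyGet? none = IndexError, outside Pre_)
def bEncDigit (d : Char) : String :=
  bCell ((PySem.List.pyGet? bDigitMasks ((d.toNat : Int) - 48)).getD 0)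

-- one character of a non-digit run
def bEncChar (c : Char) : String :=
  if c == ' ' then bCell 0
  else if bIsUpper c then
    bCell 32 ++ bCell ((PySem.List.pyGet? bLetterMasks ((c.toNat : Int) - 65)).getD 0)
  else bCell ((PySem.List.pyGet? bLetterMasks ((c.toNat : Int) - 97)).getD 0)

-- the parts appended for one run
def bEncRun (p : Bool × List Char) : List String :=
  if p.1 then bCell 58 :: p.2.map bEncDigit else p.2.map bEncChar

def english_to_braille_alt (input_str : String) : String :=
  String.join ((bRuns input_str.toList).flatMap bEncRun)

-- ===== PRECONDITION & SPEC =====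
-- Pre_ excludes exactly the inputs on which Python A raises KeyError: any character
-- that is not an ASCII letter, digit or space.
def Pre_english_to_braille (input_str : String) : Prop :=
  (input_str.toList.all fun c =>
    (65 ≤ c.toNat && c.toNat ≤ 90) || (48 ≤ c.toNat && c.toNat ≤ 57) ||
    (97 ≤ c.toNat && c.toNat ≤ 122) || c.toNat == 32) = true
instance (input_str : String) : Decidable (Pre_english_to_braille input_str) := by
  unfold Pre_english_to_braille; infer_instance

def pvWitness_english_to_braille : String := "A1b"

def Spec_english_to_braille (input_str : String) (out : String) : Prop := out = english_to_braille_alt input_str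
instance (input_str : String) (out : String) : Decidable (Spec_english_to_braille input_str out) := by unfold Spec_english_to_braille; infer_instance

-- ===== CLAIM (what is proved, stated in full; the proofs are below) =====
def Claim_equal_english_to_braille : Prop := ∀ (input_str : String), Dom_english_to_braille input_str → Pre_english_to_braille input_str → Spec_english_to_braille input_str (english_to_braille input_str)

-- ===== LEMMAS AND PROOFS =====

-- the per-character predicate of Pre_
def pvValid (c : Char) : Bool :=
  (65 ≤ c.toNat && c.toNat ≤ 90) || (48 ≤ c.toNat && c.toNat ≤ 57) ||
  (97 ≤ c.toNat && c.toNat ≤ 122) || c.toNat == 32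

theorem isDigit_eq (c : Char) : pyIsDigit c = bIsDigit c := by
  rw [Bool.eq_iff_iff]
  simp only [pyIsDigit, bIsDigit, Bool.and_eq_true, decide_eq_true_eq,
    Char.le_def, UInt32.le_iff_toNat_le, Char.toNat_val, Char.reduceVal, UInt32.reduceToNat]

-- A's chunk for one non-digit character
def aChunkN (c : Char) : List String :=
  if pyIsUpper c then [capital_follows, brailleAlphabet c.toLower] else [brailleAlphabet c]

-- per-character bridge, checked over all ASCII codes
def pvChk (c : Char) : Bool :=
  (!(bIsDigit c) || (brailleNumbers c == bEncDigit c)) &&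
  (!(pvValid c && !(bIsDigit c)) || (String.join (aChunkN c) == bEncChar c))

theorem chk_table : (List.range 128).all (fun n => pvChk (Char.ofNat n)) = true := by decide

theorem chk_of_lt (c : Char) (h : c.toNat < 128) : pvChk c = true := by
  have := List.all_eq_true.mp chk_table c.toNat (List.mem_range.mpr h)
  simpa [Char.ofNat_toNat] using this

theorem digit_lt (c : Char) (h : bIsDigit c = true) : c.toNat < 128 := by
  simp only [bIsDigit, Bool.and_eq_true, decide_eq_true_eq] at h; omega

theorem valid_lt (c : Char) (h : pvValid c = true) : c.toNat < 128 := by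
  simp only [pvValid, Bool.or_eq_true, Bool.and_eq_true, decide_eq_true_eq, beq_iff_eq] at h
  omega

theorem digit_bridge (c : Char) (h : bIsDigit c = true) : brailleNumbers c = bEncDigit c := by
  have := chk_of_lt c (digit_lt c h)
  simp only [pvChk, Bool.and_eq_true, Bool.or_eq_true, Bool.not_eq_true', beq_iff_eq] at this
  rcases this.1 with h' | h'
  · exact absurd h' (by simp [h])
  · exact h'

theorem nondigit_bridge (c : Char) (hv : pvValid c = true) (hd : bIsDigit c = false) :
    String.join (aChunkN c) = bEncChar c := by
  have := chk_of_lt c (valid_lt c hv)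
  simp only [pvChk, Bool.and_eq_true, Bool.or_eq_true, Bool.not_eq_true', beq_iff_eq] at this
  rcases this.2 with h' | h'
  · exact absurd h' (by simp [hv, hd])
  · exact h'

theorem digit_not_upper (c : Char) (h : pyIsDigit c = true) : pyIsUpper c = false := by
  simp only [pyIsDigit, Bool.and_eq_true, decide_eq_true_eq] at h
  simp only [pyIsUpper, Bool.and_eq_false_iff]
  left; simp only [decide_eq_false_iff_not]
  intro h'; exact absurd (le_trans h' h.2) (by decide)

-- recursive reading of A's loop: the list of parts produced from flag b onwards
def gA (b : Bool) : List Char → List String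
  | [] => []
  | c :: rest =>
    if pyIsUpper c then capital_follows :: brailleAlphabet c.toLower :: gA false rest
    else if pyIsDigit c then
      (if b then brailleNumbers c :: gA true rest
       else number_follows :: brailleNumbers c :: gA true rest)
    else brailleAlphabet c :: gA false rest

theorem foldl_aStep_eq_gA (l : List Char) :
    ∀ (acc : List String) (b : Bool), (l.foldl aStep (acc, b)).1 = acc ++ gA b l := by
  induction l with
  | nil => intro acc b; simp [gA]
  | cons c rest ih =>
    intro acc b
    simp only [List.foldl_cons, aStep, gA]
    by_cases hu : pyIsUpper c = true
    · simp [hu, ih]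
    · simp only [hu]
      by_cases hd : pyIsDigit c = true
      · cases b <;> simp [hd, ih]
      · simp [hd, ih]

theorem gA_true_digit_run (l : List Char) :
    gA true l = (l.takeWhile pyIsDigit).map brailleNumbers ++ gA false (l.dropWhile pyIsDigit) := by
  induction l with
  | nil => simp [gA]
  | cons c rest ih =>
    by_cases hd : pyIsDigit c = true
    · simp [gA, hd, digit_not_upper c hd, ih]
    · simp only [List.takeWhile_cons, List.dropWhile_cons, hd]
      simp [gA, hd]

theorem join_foldl (l : List String) :
    ∀ s : String, l.foldl (fun r t => r ++ t) s = s ++ String.join l := by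
  induction l with
  | nil => intro s; simp [String.join]
  | cons x xs ih =>
    intro s
    have hx : String.join (x :: xs) = x ++ String.join xs := by
      show xs.foldl (fun r t => r ++ t) ("" ++ x) = _
      rw [ih]; simp
    simp only [List.foldl_cons, ih, hx, String.append_assoc]

theorem join_cons (x : String) (xs : List String) :
    String.join (x :: xs) = x ++ String.join xs := by
  show xs.foldl (fun r t => r ++ t) ("" ++ x) = _
  rw [join_foldl]; simp

theorem join_append (a b : List String) :
    String.join (a ++ b) = String.join a ++ String.join b := by
  induction a with
  | nil => simp [String.join]
  | cons x xs ih => rw [List.cons_append, join_cons, join_cons, ih, String.append_assoc]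

-- join of a non-digit run, pointwise bridged to B's bEncChar
theorem join_nondigit_run (run : List Char)
    (hv : ∀ c ∈ run, pvValid c = true) (hd : ∀ c ∈ run, bIsDigit c = false) :
    String.join (run.flatMap aChunkN) = String.join (run.map bEncChar) := by
  induction run with
  | nil => rfl
  | cons c rest ih =>
    rw [List.flatMap_cons, List.map_cons, join_append, join_cons,
      ih (fun x hx => hv x (List.mem_cons_of_mem _ hx))
          (fun x hx => hd x (List.mem_cons_of_mem _ hx)),
      nondigit_bridge c (hv c List.mem_cons_self) (hd c List.mem_cons_self)]

-- digit run, pointwise bridged to B's bEncDigit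
theorem map_digit_run (run : List Char) (hd : ∀ c ∈ run, bIsDigit c = true) :
    run.map brailleNumbers = run.map bEncDigit :=
  List.map_congr_left fun c hc => digit_bridge c (hd c hc)

-- gA false over a leading non-digit run, as a flatMap of aChunkN
theorem gA_false_nondigit_run (l : List Char) :
    gA false l = (l.takeWhile (fun x => !pyIsDigit x)).flatMap aChunkN ++
      gA false (l.dropWhile (fun x => !pyIsDigit x)) := by
  induction l with
  | nil => simp [gA]
  | cons c rest ih =>
    by_cases hd : pyIsDigit c = true
    · simp [hd]
    · have hd' : pyIsDigit c = false := by simpa using hd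
      by_cases hu : pyIsUpper c = true <;>
        simp [gA, hd', hu, ih, aChunkN]

theorem bRuns_cons_digit (c : Char) (rest : List Char) (hd : bIsDigit c = true) :
    bRuns (c :: rest) =
      (true, c :: rest.takeWhile (fun x => bIsDigit x)) ::
        bRuns (rest.dropWhile (fun x => bIsDigit x)) := by
  rw [bRuns]; simp [hd]

theorem bRuns_cons_nondigit (c : Char) (rest : List Char) (hd : bIsDigit c = false) :
    bRuns (c :: rest) =
      (false, c :: rest.takeWhile (fun x => !bIsDigit x)) ::
        bRuns (rest.dropWhile (fun x => !bIsDigit x)) := by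
  rw [bRuns]; simp [hd]

-- main bridge: A's parts and B's parts have the same join, on valid characters
theorem gA_join_eq_runs (n : Nat) : ∀ (l : List Char), l.length ≤ n →
    (∀ c ∈ l, pvValid c = true) →
    String.join (gA false l) = String.join ((bRuns l).flatMap bEncRun) := by
  induction n with
  | zero =>
    intro l hl _
    have : l = [] := List.eq_nil_of_length_eq_zero (Nat.le_zero.mp hl)
    subst this; simp [gA, bRuns]
  | succ n ih =>
    intro l hl hv
    match l with
    | [] => simp [gA, bRuns]
    | c :: rest =>
      have hPD := isDigit_eq
      by_cases hd : bIsDigit c = true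
      · -- digit run
        have hdp : pyIsDigit c = true := (hPD c).trans hd
        have hu : pyIsUpper c = false := digit_not_upper c hdp
        have hrec : (rest.dropWhile (fun x => bIsDigit x)).length ≤ n := by
          have := List.length_dropWhile_le (fun x => bIsDigit x) rest
          simp only [List.length_cons] at hl; omega
        have hfun : pyIsDigit = (fun x => bIsDigit x) := funext hPD
        have htw : rest.takeWhile pyIsDigit = rest.takeWhile (fun x => bIsDigit x) := by
          rw [hfun]
        have hdw : rest.dropWhile pyIsDigit = rest.dropWhile (fun x => bIsDigit x) := by
          rw [hfun]
        have hvrec : ∀ x ∈ rest.dropWhile (fun x => bIsDigit x), pvValid x = true :=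
          fun x hx => hv x (List.mem_cons_of_mem _
            ((List.dropWhile_sublist _).subset hx))
        have hdrun : ∀ x ∈ c :: rest.takeWhile (fun x => bIsDigit x), bIsDigit x = true := by
          intro x hx
          rcases List.mem_cons.mp hx with h | h
          · subst h; exact hd
          · simpa using List.mem_takeWhile_imp h
        have hgA : gA false (c :: rest) =
            number_follows :: ((c :: rest.takeWhile (fun x => bIsDigit x)).map brailleNumbers
              ++ gA false (rest.dropWhile (fun x => bIsDigit x))) := by
          rw [show gA false (c :: rest) = number_follows :: brailleNumbers c :: gA true rest by
                simp [gA, hdp, hu],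
            gA_true_digit_run, htw, hdw, List.map_cons, List.cons_append]
        rw [hgA, bRuns_cons_digit c rest hd, List.flatMap_cons,
          show bEncRun (true, c :: rest.takeWhile (fun x => bIsDigit x)) =
            bCell 58 :: (c :: rest.takeWhile (fun x => bIsDigit x)).map bEncDigit by
              simp [bEncRun]]
        rw [join_cons, join_append, List.cons_append, join_cons, join_append,
          ih _ hrec hvrec, ← map_digit_run _ hdrun]
        rw [show number_follows = bCell 58 from by decide]
      · -- non-digit run
        have hd' : bIsDigit c = false := by simpa using hd
        have hnfun : (fun x => !pyIsDigit x) = (fun x => !bIsDigit x) :=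
          funext fun x => by rw [hPD x]
        have hdp : pyIsDigit c = false := (hPD c).trans hd' 
        have hrec : (rest.dropWhile (fun x => !bIsDigit x)).length ≤ n := by
          have := List.length_dropWhile_le (fun x => !bIsDigit x) rest
          simp only [List.length_cons] at hl; omega
        have htw : (c :: rest).takeWhile (fun x => !pyIsDigit x) =
            c :: rest.takeWhile (fun x => !bIsDigit x) := by
          rw [List.takeWhile_cons, hnfun]
          simp [hdp]
        have hdw : (c :: rest).dropWhile (fun x => !pyIsDigit x) =
            rest.dropWhile (fun x => !bIsDigit x) := by
          rw [List.dropWhile_cons, hnfun]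
          simp [hdp]
        have hvrec : ∀ x ∈ rest.dropWhile (fun x => !bIsDigit x), pvValid x = true :=
          fun x hx => hv x (List.mem_cons_of_mem _
            ((List.dropWhile_sublist _).subset hx))
        have hrunmem : ∀ x ∈ c :: rest.takeWhile (fun x => !bIsDigit x), x ∈ c :: rest := by
          intro x hx
          rcases List.mem_cons.mp hx with h | h
          · subst h; exact List.mem_cons_self
          · exact List.mem_cons_of_mem _ ((List.takeWhile_sublist _).subset h)
        have hvrun : ∀ x ∈ c :: rest.takeWhile (fun x => !bIsDigit x), pvValid x = true :=
          fun x hx => hv x (hrunmem x hx)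
        have hdrun : ∀ x ∈ c :: rest.takeWhile (fun x => !bIsDigit x), bIsDigit x = false := by
          intro x hx
          rcases List.mem_cons.mp hx with h | h
          · subst h; exact hd'
          · simpa using List.mem_takeWhile_imp h
        rw [bRuns_cons_nondigit c rest hd', List.flatMap_cons,
          show bEncRun (false, c :: rest.takeWhile (fun x => !bIsDigit x)) =
            (c :: rest.takeWhile (fun x => !bIsDigit x)).map bEncChar by simp [bEncRun],
          gA_false_nondigit_run (c :: rest), htw, hdw,
          join_append, join_append, ih _ hrec hvrec,
          join_nondigit_run _ hvrun hdrun]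

-- ===== VERDICT (by name: the statement is the Claim_ definition above) =====
theorem english_to_braille_spec : Claim_equal_english_to_braille := by
  intro s _ hpre
  unfold Spec_english_to_braille english_to_braille english_to_braille_alt
  rw [foldl_aStep_eq_gA, List.nil_append]
  exact gA_join_eq_runs s.toList.length s.toList le_rfl
    (fun c hc => List.all_eq_true.mp hpre c hc)
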